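-- pv_equiv track=rewrite | github.com/linyueqian/VERA | models/voice/ultravox.py | parse_mrcr_context
-- ===== SOURCE A (Python) =====
-- from typing import Dict, List, Any, Optional
--
-- def parse_mrcr_context(context: str) -> List[Dict[str, str]]:
--     """Parse MRCR context document into conversation messages (User:/Assistant:)."""
--     messages: List[Dict[str, str]] = []
--     role: Optional[str] = None
--     buf: List[str] = []
--     for line in context.splitlines():
--         if line.startswith('User:'):
--             if role and buf:
--                 messages.append({'role': role, 'content': "\n".join(buf).strip()})
--             role = 'user'
--             buf = [line[len('User:'):].strip()]
--         elif line.startswith('Assistant:'):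
--             if role and buf:
--                 messages.append({'role': role, 'content': "\n".join(buf).strip()})
--             role = 'assistant'
--             buf = [line[len('Assistant:'):].strip()]
--         else:
--             buf.append(line)
--     if role and buf:
--         messages.append({'role': role, 'content': "\n".join(buf).strip()})
--     return messages
-- ===== SOURCE B (Python) =====
-- def parse_mrcr_context(context):
--     """Parse MRCR context by one reverse sweep, building the messages back-to-front."""
--     messages = []
--     tail = []  # non-marker lines below the current position, in reverse document order
--     for line in reversed(context.splitlines()):
--         if line.startswith('User:'):
--             role, head = 'user', line[len('User:'):].strip()
--         elif line.startswith('Assistant:'):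
--             role, head = 'assistant', line[len('Assistant:'):].strip()
--         else:
--             tail.append(line)
--             continue
--         messages.append({'role': role, 'content': "\n".join([head] + tail[::-1]).strip()})
--         tail = []
--     messages.reverse()
--     return messages
-- ===== Notes on version B (the rewrite author's own statement) =====
-- stated objective: alternative
-- what changed: B replaces A's forward pass with role/buffer state and deferred flushes by a single reverse sweep that emits each message immediately at its marker line (the tail lines are already collected) and finally reverses the message list.
import Mathlib
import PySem

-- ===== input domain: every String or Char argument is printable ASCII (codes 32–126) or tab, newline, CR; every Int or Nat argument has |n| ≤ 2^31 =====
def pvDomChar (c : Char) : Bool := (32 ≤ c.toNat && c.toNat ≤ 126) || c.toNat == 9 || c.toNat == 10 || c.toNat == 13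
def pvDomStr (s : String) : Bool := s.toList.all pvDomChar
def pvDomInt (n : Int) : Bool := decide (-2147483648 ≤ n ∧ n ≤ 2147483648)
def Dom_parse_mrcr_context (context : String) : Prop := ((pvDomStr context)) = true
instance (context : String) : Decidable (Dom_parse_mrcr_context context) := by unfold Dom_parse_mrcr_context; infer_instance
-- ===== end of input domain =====

-- B replaces A's forward pass (role/buffer state, deferred flushes) by one reverse sweep that
-- emits each message at its marker line and reverses the result; same cost, different traversal.

def pvMsg (r c : String) : List (String × String) := [("role", r), ("content", c)]

-- ===== PORT A =====
-- Python's 'if role and buf: messages.append(...)', used three times in A.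
def pvFlushA (msgs : List (List (String × String))) (role : Option String) (buf : List String) :
    List (List (String × String)) :=
  match role with
  | some r => if buf.isEmpty then msgs
              else msgs ++ [pvMsg r (PySem.Str.strip (PySem.Str.join "\n" buf))]
  | none => msgs

def pvStepA (st : List (List (String × String)) × Option String × List String) (line : String) :
    List (List (String × String)) × Option String × List String :=
  if PySem.Str.startswith line "User:" then
    (pvFlushA st.1 st.2.1 st.2.2, some "user",
     [PySem.Str.strip (PySem.Str.slice line (some 5) none)])
  else if PySem.Str.startswith line "Assistant:" then
    (pvFlushA st.1 st.2.1 st.2.2, some "assistant",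
     [PySem.Str.strip (PySem.Str.slice line (some 10) none)])
  else
    (st.1, st.2.1, st.2.2 ++ [line])

def parse_mrcr_context (context : String) : List (List (String × String)) :=
  let st := (PySem.Str.splitlines context).foldl pvStepA ([], none, [])
  pvFlushA st.1 st.2.1 st.2.2

-- ===== PORT B =====
def pvMark? (line : String) : Option (String × String) :=
  if PySem.Str.startswith line "User:" then
    some ("user", PySem.Str.strip (PySem.Str.slice line (some 5) none))
  else if PySem.Str.startswith line "Assistant:" then
    some ("assistant", PySem.Str.strip (PySem.Str.slice line (some 10) none))
  else none

def pvRevStep (st : List (List (String × String)) × List String) (line : String) :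
    List (List (String × String)) × List String :=
  match pvMark? line with
  | some (r, h) =>
      (st.1 ++ [pvMsg r (PySem.Str.strip (PySem.Str.join "\n" (h :: st.2.reverse)))], [])
  | none => (st.1, st.2 ++ [line])

def parse_mrcr_context_alt (context : String) : List (List (String × String)) :=
  (((PySem.Str.splitlines context).reverse).foldl pvRevStep ([], [])).1.reverse

-- ===== PRECONDITION & SPEC =====
def Spec_parse_mrcr_context (context : String) (out : List (List (String × String))) : Prop := out = parse_mrcr_context_alt context
instance (context : String) (out : List (List (String × String))) : Decidable (Spec_parse_mrcr_context context out) := by unfold Spec_parse_mrcr_context; infer_instance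

-- ===== CLAIM (what is proved, stated in full; the proofs are below) =====
def Claim_equal_parse_mrcr_context : Prop := ∀ (context : String), Dom_parse_mrcr_context context → Spec_parse_mrcr_context context (parse_mrcr_context context)

-- ===== LEMMAS AND PROOFS =====

-- Common recursive specification: process the remaining lines with an optional open (role, buf) segment.
def pvCollect : List String → Option (String × List String) → List (List (String × String))
  | [], st =>
      match st with
      | some (r, buf) => [pvMsg r (PySem.Str.strip (PySem.Str.join "\n" buf))]
      | none => []
  | l :: ls, st =>
      match pvMark? l with
      | some (r, h) =>
          (match st with
           | some (r', buf) => [pvMsg r' (PySem.Str.strip (PySem.Str.join "\n" buf))]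
           | none => []) ++ pvCollect ls (some (r, [h]))
      | none =>
          pvCollect ls (match st with
                        | some (r', buf) => some (r', buf ++ [l])
                        | none => none)

def pvStOf (role : Option String) (buf : List String) : Option (String × List String) :=
  match role with
  | some r => some (r, buf)
  | none => none

-- A's step, expressed through the marker classifier (same branches, same order).
theorem pvStepA_eq (st : List (List (String × String)) × Option String × List String)
    (l : String) :
    pvStepA st l =
      match pvMark? l with
      | some (r, h) => (pvFlushA st.1 st.2.1 st.2.2, some r, [h])
      | none => (st.1, st.2.1, st.2.2 ++ [l]) := by
  unfold pvStepA pvMark?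
  split_ifs <;> rfl

theorem pvFlushA_eq (msgs : List (List (String × String))) (role : Option String)
    (buf : List String) (hinv : role.isSome = true → buf ≠ []) :
    pvFlushA msgs role buf =
      msgs ++ (match pvStOf role buf with
               | some (r', b) => [pvMsg r' (PySem.Str.strip (PySem.Str.join "\n" b))]
               | none => []) := by
  cases role with
  | none => simp [pvFlushA, pvStOf]
  | some r =>
      have hb : buf ≠ [] := hinv rfl
      simp [pvFlushA, pvStOf, List.isEmpty_eq_false_iff.mpr hb]

theorem pvFoldA_collect (lines : List String) :
    ∀ (msgs : List (List (String × String))) (role : Option String) (buf : List String),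
      (role.isSome = true → buf ≠ []) →
      pvFlushA (lines.foldl pvStepA (msgs, role, buf)).1
          (lines.foldl pvStepA (msgs, role, buf)).2.1
          (lines.foldl pvStepA (msgs, role, buf)).2.2 =
        msgs ++ pvCollect lines (pvStOf role buf) := by
  induction lines with
  | nil =>
      intro msgs role buf hinv
      simpa [pvCollect, List.foldl_nil] using pvFlushA_eq msgs role buf hinv
  | cons l ls ih =>
      intro msgs role buf hinv
      rw [List.foldl_cons, pvStepA_eq]
      cases hm : pvMark? l with
      | some p =>
          obtain ⟨r, h⟩ := p
          rw [show (match some (r, h) with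
                | some (r, h) =>
                    ((pvFlushA (msgs, role, buf).1 (msgs, role, buf).2.1 (msgs, role, buf).2.2 :
                        List (List (String × String))), some r, [h])
                | none => ((msgs, role, buf).1, (msgs, role, buf).2.1, (msgs, role, buf).2.2 ++ [l])) =
              (pvFlushA msgs role buf, some r, [h]) from rfl]
          rw [ih (pvFlushA msgs role buf) (some r) [h] (by simp)]
          rw [pvFlushA_eq msgs role buf hinv]
          simp [pvCollect, hm, pvStOf]
      | none =>
          rw [show (match (none : Option (String × String)) with
                | some (r, h) =>
                    ((pvFlushA (msgs, role, buf).1 (msgs, role, buf).2.1 (msgs, role, buf).2.2 :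
                        List (List (String × String))), some r, [h])
                | none => ((msgs, role, buf).1, (msgs, role, buf).2.1, (msgs, role, buf).2.2 ++ [l])) =
              (msgs, role, buf ++ [l]) from rfl]
          rw [ih msgs role (buf ++ [l]) (by intro _; simp)]
          cases role with
          | none => simp [pvCollect, hm, pvStOf]
          | some r => simp [pvCollect, hm, pvStOf]

-- B's fold over the reversed lines, as a function of the line list.
def pvG (ls : List String) : List (List (String × String)) × List String :=
  ls.reverse.foldl pvRevStep ([], [])

theorem pvG_cons (l : String) (ls : List String) :
    pvG (l :: ls) = pvRevStep (pvG ls) l := by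
  unfold pvG
  rw [List.reverse_cons, List.foldl_append, List.foldl_cons, List.foldl_nil]

theorem pvFoldB_collect (ls : List String) :
    ((pvG ls).1.reverse = pvCollect ls none) ∧
    (∀ r buf, pvCollect ls (some (r, buf)) =
        pvMsg r (PySem.Str.strip (PySem.Str.join "\n" (buf ++ (pvG ls).2.reverse)))
          :: pvCollect ls none) := by
  induction ls with
  | nil => simp [pvG, pvCollect]
  | cons l ls ih =>
      obtain ⟨ih1, ih2⟩ := ih
      cases hm : pvMark? l with
      | some p =>
          obtain ⟨r0, h0⟩ := p
          have hcol : pvCollect (l :: ls) none = pvCollect ls (some (r0, [h0])) := by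
            simp [pvCollect, hm]
          constructor
          · rw [pvG_cons]
            simp only [pvRevStep, hm]
            rw [hcol, ih2 r0 [h0]]
            simp [ih1]
          · intro r buf
            rw [pvG_cons]
            simp only [pvRevStep, hm]
            rw [show pvCollect (l :: ls) (some (r, buf)) =
                pvMsg r (PySem.Str.strip (PySem.Str.join "\n" buf)) ::
                  pvCollect ls (some (r0, [h0])) by simp [pvCollect, hm]]
            rw [ih2 r0 [h0], hcol, ih2 r0 [h0]]
            simp
      | none =>
          have hcol : pvCollect (l :: ls) none = pvCollect ls none := by
            simp [pvCollect, hm]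
          constructor
          · rw [pvG_cons]
            simp only [pvRevStep, hm]
            rw [hcol]
            exact ih1
          · intro r buf
            rw [pvG_cons]
            simp only [pvRevStep, hm]
            rw [show pvCollect (l :: ls) (some (r, buf)) =
                pvCollect ls (some (r, buf ++ [l])) by simp [pvCollect, hm]]
            rw [ih2 r (buf ++ [l]), hcol]
            simp

-- ===== VERDICT (by name: the statement is the Claim_ definition above) =====
theorem parse_mrcr_context_spec : Claim_equal_parse_mrcr_context := by
  intro context _
  unfold Spec_parse_mrcr_context parse_mrcr_context parse_mrcr_context_alt
  rw [show ((PySem.Str.splitlines context).reverse.foldl pvRevStep ([], [])) =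
      pvG (PySem.Str.splitlines context) from rfl]
  rw [(pvFoldB_collect (PySem.Str.splitlines context)).1]
  simpa [pvStOf] using
    pvFoldA_collect (PySem.Str.splitlines context) [] none [] (by simp)
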